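-- pv_equiv track=rewrite | github.com/krzys194/CodeWars | PhoneNumber(6kyu).py | phone_words
-- ===== SOURCE A (Python) =====
-- def phone_words(string_of_nums):
--     buttons = {
--     0: " ", 2: "a", 22: "b", 222: "c", 3: "d", 33: "e", 333: "f", 4: "g",44: "h",
--     444: "i", 5: "j", 55: "k", 555: "l", 6: "m", 66: "n", 666: "o", 7: "p",
--     77: "q", 777: "r", 7777: "s", 8: "t", 88: "u", 888: "v", 9: "w", 99: "x", 999: "y", 9999: "z",
--     }
--     i=0
--     nrToStr = ""
--     string_of_nums = string_of_nums+"-"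
--     newStr = string_of_nums[i]
--
--     while string_of_nums[i] != "-":
--         if newStr == "1":
--             newStr = string_of_nums[i+1]
--         elif newStr == "7777" or newStr == "9999":
--             nrToStr += buttons[int(newStr)]
--             newStr = string_of_nums[i+1]
--         elif newStr == "777":
--             if string_of_nums[i+1] == "7":
--                 newStr += string_of_nums[i+1]
--             else:
--                 nrToStr += buttons[int(newStr)]
--                 newStr = string_of_nums[i+1]
--         elif newStr == "999":
--             if string_of_nums[i+1] == "9":
--                 newStr += string_of_nums[i+1]
--             else:
--                 nrToStr += buttons[int(newStr)]
--                 newStr = string_of_nums[i+1]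
--         elif len(newStr) == 3:
--             nrToStr += buttons[int(newStr)]
--             newStr = string_of_nums[i+1]
--         elif newStr == "0":
--             nrToStr = nrToStr + " "
--             newStr = string_of_nums[i+1]
--         elif string_of_nums[i] == string_of_nums[i+1]:
--             newStr += string_of_nums[i+1]
--         else:
--             nrToStr += buttons[int(newStr)]
--             newStr = string_of_nums[i+1]
--         i += 1
--     return nrToStr
-- ===== SOURCE B (Python) =====
-- LETTERS = {'2': 'abc', '3': 'def', '4': 'ghi', '5': 'jkl',
--            '6': 'mno', '7': 'pqrs', '8': 'tuv', '9': 'wxyz'}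
--
--
-- def _emit(ch, n):
--     """Letters for a maximal run of n presses of key ch."""
--     if ch == '1':
--         return ''
--     if ch == '0':
--         return ' ' * n
--     tab = LETTERS[ch]
--     q, r = divmod(n, len(tab))
--     return tab[-1] * q + (tab[r - 1] if r else '')
--
--
-- def phone_words(string_of_nums):
--     # A hyphen terminates the message (as in the original, which appends one as a sentinel).
--     message = string_of_nums.split('-', 1)[0]
--     pieces = []
--     prev, count = None, 0
--     for ch in message:
--         if ch == prev:
--             count += 1
--         else:
--             if prev is not None:
--                 pieces.append(_emit(prev, count))
--             prev, count = ch, 1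
--     if prev is not None:
--         pieces.append(_emit(prev, count))
--     return ''.join(pieces)
-- ===== Notes on version B (the rewrite author's own statement) =====
-- stated objective: simpler
-- what changed: Replaces A's stateful lookahead state machine (growing a key string, flushing via per-length/per-digit branches and a 27-entry int-keyed table) with a split on the hyphen terminator followed by a run-length-counting pass that emits each maximal run arithmetically via divmod over an 8-entry digit->letters table.
import Mathlib
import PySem

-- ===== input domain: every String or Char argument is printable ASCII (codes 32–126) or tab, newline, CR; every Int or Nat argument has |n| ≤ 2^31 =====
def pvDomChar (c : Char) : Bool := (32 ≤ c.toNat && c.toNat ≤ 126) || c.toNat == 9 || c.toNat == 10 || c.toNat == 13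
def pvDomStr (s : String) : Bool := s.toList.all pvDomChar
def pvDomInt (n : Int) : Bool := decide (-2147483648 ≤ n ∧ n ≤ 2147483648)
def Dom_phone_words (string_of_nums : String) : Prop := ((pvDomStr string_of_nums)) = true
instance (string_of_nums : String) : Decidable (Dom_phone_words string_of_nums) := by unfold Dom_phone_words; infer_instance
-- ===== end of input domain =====

-- B replaces A's stateful lookahead state machine with a run-length-counting pass that
-- emits each maximal run arithmetically via divmod (objective: simpler).

-- ===== PORT A =====
-- buttons[int(newStr)]: the 27-entry table, keyed here by the digit-run string itself
-- (int() of a run of one repeated digit is injective on these keys); [] where Python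
-- would raise KeyError/ValueError (outside Pre_).
def pwButtons (w : List Char) : List Char :=
  match w with
  | ['0'] => [' ']
  | ['2'] => ['a'] | ['2','2'] => ['b'] | ['2','2','2'] => ['c']
  | ['3'] => ['d'] | ['3','3'] => ['e'] | ['3','3','3'] => ['f']
  | ['4'] => ['g'] | ['4','4'] => ['h'] | ['4','4','4'] => ['i']
  | ['5'] => ['j'] | ['5','5'] => ['k'] | ['5','5','5'] => ['l']
  | ['6'] => ['m'] | ['6','6'] => ['n'] | ['6','6','6'] => ['o']
  | ['7'] => ['p'] | ['7','7'] => ['q'] | ['7','7','7'] => ['r'] | ['7','7','7','7'] => ['s']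
  | ['8'] => ['t'] | ['8','8'] => ['u'] | ['8','8','8'] => ['v']
  | ['9'] => ['w'] | ['9','9'] => ['x'] | ['9','9','9'] => ['y'] | ['9','9','9','9'] => ['z']
  | _ => []

-- A's while loop: i ↦ the suffix of string_of_nums+"-" starting at i; w = newStr; acc = nrToStr.
def pwLoop : List Char → List Char → List Char → List Char
  | [], _, acc => acc
  | c :: rest, w, acc =>
    if c = '-' then acc
    else
      let nx := rest.headD '-'
      if w = ['1'] then pwLoop rest [nx] acc
      else if w = ['7','7','7','7'] ∨ w = ['9','9','9','9'] then pwLoop rest [nx] (acc ++ pwButtons w)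
      else if w = ['7','7','7'] then
        if nx = '7' then pwLoop rest (w ++ [nx]) acc else pwLoop rest [nx] (acc ++ pwButtons w)
      else if w = ['9','9','9'] then
        if nx = '9' then pwLoop rest (w ++ [nx]) acc else pwLoop rest [nx] (acc ++ pwButtons w)
      else if w.length = 3 then pwLoop rest [nx] (acc ++ pwButtons w)
      else if w = ['0'] then pwLoop rest [nx] (acc ++ [' '])
      else if c = nx then pwLoop rest (w ++ [nx]) acc
      else pwLoop rest [nx] (acc ++ pwButtons w)

def phone_words (string_of_nums : String) : String :=
  let cs := string_of_nums.toList ++ ['-']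
  String.mk (pwLoop cs [cs.headD '-'] [])

-- ===== PORT B =====
-- LETTERS[ch]; [] where Python would raise KeyError (outside Pre_).
def pwTab (c : Char) : List Char :=
  match c with
  | '2' => ['a','b','c'] | '3' => ['d','e','f'] | '4' => ['g','h','i'] | '5' => ['j','k','l']
  | '6' => ['m','n','o'] | '7' => ['p','q','r','s'] | '8' => ['t','u','v'] | '9' => ['w','x','y','z']
  | _ => []

-- _emit(ch, n): letters for a maximal run of n presses of key ch.
def pwEmit (c : Char) (n : Nat) : List Char :=
  if c = '1' then []
  else if c = '0' then List.replicate n ' '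
  else
    let tab := pwTab c
    let q := n / tab.length
    let r := n % tab.length
    List.replicate q (tab.getLastD '?') ++ (if r = 0 then [] else [tab.getD (r - 1) '?'])

-- the run-counting pass: p = prev, k = count (entered after the first character).
def pwRun : List Char → Char → Nat → List Char
  | [], p, k => pwEmit p k
  | c :: rest, p, k => if c = p then pwRun rest p (k + 1) else pwEmit p k ++ pwRun rest c 1

def phone_words_alt (string_of_nums : String) : String :=
  -- string_of_nums.split('-', 1)[0]: everything before the first hyphen
  match string_of_nums.toList.takeWhile (fun c => c != '-') with
  | [] => ""
  | c :: rest => String.mk (pwRun rest c 1)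

-- ===== PRECONDITION & SPEC =====
-- Pre_ is exactly A's domain: every character before the first hyphen (A's end-of-input
-- terminator, the sentinel it appends) is a digit; on every other input A raises
-- (ValueError/KeyError).
def Pre_phone_words (string_of_nums : String) : Prop :=
  ((string_of_nums.toList.takeWhile (fun c => c != '-')).all
    (fun c => c ∈ (['0','1','2','3','4','5','6','7','8','9'] : List Char))) = true
instance (string_of_nums : String) : Decidable (Pre_phone_words string_of_nums) := by
  unfold Pre_phone_words; infer_instance
def pvWitness_phone_words : String := "44330777-x"
def Spec_phone_words (string_of_nums : String) (out : String) : Prop := out = phone_words_alt string_of_nums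
instance (string_of_nums : String) (out : String) : Decidable (Spec_phone_words string_of_nums out) := by unfold Spec_phone_words; infer_instance

-- ===== CLAIM (what is proved, stated in full; the proofs are below) =====
def Claim_equal_phone_words : Prop := ∀ (string_of_nums : String), Dom_phone_words string_of_nums → Pre_phone_words string_of_nums → Spec_phone_words string_of_nums (phone_words string_of_nums)

-- ===== LEMMAS AND PROOFS =====

-- reachable loop states of A: newStr = replicate k c with these bounds on k
def pwOkK (c : Char) (k : Nat) : Prop :=
  if c = '0' ∨ c = '1' then k = 1 else 1 ≤ k ∧ k ≤ (pwTab c).length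

lemma pwEmit_shift (d : Char) (h0 : d ≠ '0') (h1 : d ≠ '1') (hd : pwTab d ≠ [])
    (m : Nat) :
    pwEmit d ((pwTab d).length + m) = (pwTab d).getLastD '?' :: pwEmit d m := by
  have hpos : 0 < (pwTab d).length := List.length_pos_iff.mpr hd
  simp only [pwEmit, if_neg h0, if_neg h1, Nat.add_comm (pwTab d).length m,
    Nat.add_div_right _ hpos, Nat.add_mod_right, List.replicate_succ, List.cons_append]

lemma pwRun_shift (d : Char) (j : Nat) (pre : List Char)
    (h : ∀ m, pwEmit d (j + m) = pre ++ pwEmit d m) :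
    ∀ rest k, pwRun rest d (j + k) = pre ++ pwRun rest d k := by
  intro rest
  induction rest with
  | nil => intro k; simpa [pwRun] using h k
  | cons x r ih =>
    intro k
    by_cases hx : x = d
    · simp only [pwRun, if_pos hx, Nat.add_assoc]
      exact ih (k + 1)
    · simp [pwRun, hx, h k]

set_option maxHeartbeats 2000000 in
-- the one-step behaviour of A's loop at a reachable state
lemma pwLoop_step (c : Char) (k : Nat) (rest acc : List Char)
    (hc : c ∈ (['0','1','2','3','4','5','6','7','8','9'] : List Char)) (hk : pwOkK c k) :
    pwLoop (c :: rest) (List.replicate k c) acc =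
      if c = '1' then pwLoop rest [rest.headD '-'] acc
      else if c = '0' then pwLoop rest [rest.headD '-'] (acc ++ [' '])
      else if rest.headD '-' = c ∧ k < (pwTab c).length then
        pwLoop rest (List.replicate (k + 1) c) acc
      else pwLoop rest [rest.headD '-'] (acc ++ pwEmit c k) := by
  rcases eq_or_ne (rest.headD '-') c with hx | hx <;>
  fin_cases hc <;>
  simp only [pwOkK, pwTab] at hk <;>
  (try obtain ⟨hk1, hk2⟩ := hk) <;>
  (try simp only [List.length_cons, List.length_nil] at hk2) <;>
  (try interval_cases k) <;>
  simp_all [pwLoop, pwEmit, pwButtons, pwTab, List.replicate] <;>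
  exact fun h => absurd h.symm hx
lemma pwEmit_one_shift : ∀ m, pwEmit '1' (1 + m) = [] ++ pwEmit '1' m := by
  intro m; simp [pwEmit]

lemma pwEmit_zero_shift : ∀ m, pwEmit '0' (1 + m) = [' '] ++ pwEmit '0' m := by
  intro m; simp [pwEmit, Nat.add_comm 1 m, List.replicate_succ]

lemma pwOkK_one (c : Char) (hc : c ∈ (['0','1','2','3','4','5','6','7','8','9'] : List Char)) :
    pwOkK c 1 := by
  fin_cases hc <;> simp [pwOkK, pwTab]

lemma pwTab_ne_nil (c : Char) (hc : c ∈ (['0','1','2','3','4','5','6','7','8','9'] : List Char))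
    (h0 : c ≠ '0') (h1 : c ≠ '1') : pwTab c ≠ [] := by
  fin_cases hc <;> simp_all [pwTab]

lemma pwEmit_zero_presses (c : Char) (h0 : c ≠ '0') (h1 : c ≠ '1') : pwEmit c 0 = [] := by
  simp [pwEmit, h0, h1]

lemma pwEmit_cap (c : Char) (h0 : c ≠ '0') (h1 : c ≠ '1') (ht : pwTab c ≠ []) :
    pwEmit c (pwTab c).length = [(pwTab c).getLastD '?'] := by
  have := pwEmit_shift c h0 h1 ht 0
  simpa [pwEmit_zero_presses c h0 h1] using this

lemma pwLoop_run (junk : List Char) :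
    ∀ (rest : List Char) (c : Char) (k : Nat) (acc : List Char),
    (∀ x ∈ rest, x ∈ (['0','1','2','3','4','5','6','7','8','9'] : List Char)) →
    c ∈ (['0','1','2','3','4','5','6','7','8','9'] : List Char) → pwOkK c k →
    pwLoop (c :: (rest ++ ('-' :: junk))) (List.replicate k c) acc = acc ++ pwRun rest c k := by
  intro rest
  induction rest with
  | nil =>
    intro c k acc _ hc hok
    rw [List.nil_append, pwLoop_step c k ('-' :: junk) acc hc hok]
    by_cases h1 : c = '1'
    · subst h1
      simp only [pwOkK] at hok; simp_all [pwLoop, pwRun, pwEmit]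
    · by_cases h0 : c = '0'
      · subst h0
        simp only [pwOkK] at hok; simp_all [pwLoop, pwRun, pwEmit]
      · have hne : ¬(('-' : Char) = c) := by fin_cases hc <;> simp_all
        simp [pwLoop, pwRun, h1, h0, hne]
  | cons x rest' ih =>
    intro c k acc hr hc hok
    have hx : x ∈ (['0','1','2','3','4','5','6','7','8','9'] : List Char) := hr x (by simp)
    have hr' : ∀ y ∈ rest', y ∈ (['0','1','2','3','4','5','6','7','8','9'] : List Char) :=
      fun y hy => hr y (by simp [hy])
    rw [List.cons_append, pwLoop_step c k (x :: (rest' ++ ('-' :: junk))) acc hc hok]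
    have ih1 : pwLoop (x :: (rest' ++ ('-' :: junk))) [x] acc = acc ++ pwRun rest' x 1 := by
      simpa using ih x 1 acc hr' hx (pwOkK_one x hx)
    by_cases h1 : c = '1'
    · subst h1
      simp only [pwOkK] at hok; subst hok
      simp only [List.headD_cons]
      rw [ih1]
      by_cases hx1 : x = '1'
      · subst hx1
        have := pwRun_shift '1' 1 [] pwEmit_one_shift rest' 1
        simp only [List.nil_append] at this
        simp [pwRun, this]
      · simp [pwRun, hx1, pwEmit]
    · by_cases h0 : c = '0'
      · subst h0
        simp only [pwOkK] at hok; subst hok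
        simp only [if_neg h1, List.headD_cons]
        have ih1' : pwLoop (x :: (rest' ++ ('-' :: junk))) [x] (acc ++ [' ']) =
            (acc ++ [' ']) ++ pwRun rest' x 1 := by
          simpa using ih x 1 (acc ++ [' ']) hr' hx (pwOkK_one x hx)
        rw [ih1']
        by_cases hx0 : x = '0'
        · subst hx0
          have := pwRun_shift '0' 1 [' '] pwEmit_zero_shift rest' 1
          simp [pwRun, this]
        · simp [pwRun, hx0, pwEmit]
      · -- letter key
        have ht : pwTab c ≠ [] := pwTab_ne_nil c hc h0 h1
        have hok' : 1 ≤ k ∧ k ≤ (pwTab c).length := by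
          simpa [pwOkK, h0, h1] using hok
        simp only [if_neg h1, if_neg h0, List.headD_cons]
        by_cases hcond : x = c ∧ k < (pwTab c).length
        · obtain ⟨rfl, hlt⟩ := hcond
          rw [if_pos ⟨rfl, hlt⟩]
          have hok2 : pwOkK x (k + 1) := by
            simp [pwOkK, h0, h1]; omega
          rw [ih x (k + 1) acc hr' hx hok2]
          simp [pwRun]
        · rw [if_neg (by tauto)]
          have ihE : pwLoop (x :: (rest' ++ ('-' :: junk))) [x] (acc ++ pwEmit c k) =
              (acc ++ pwEmit c k) ++ pwRun rest' x 1 := by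
            simpa using ih x 1 (acc ++ pwEmit c k) hr' hx (pwOkK_one x hx)
          rw [ihE]
          by_cases hxc : x = c
          · subst hxc
            have hcap : k = (pwTab x).length := by
              rcases Nat.lt_or_ge k (pwTab x).length with h | h
              · exact absurd ⟨rfl, h⟩ hcond
              · omega
            subst hcap
            have := pwRun_shift x (pwTab x).length [(pwTab x).getLastD '?']
              (fun m => by simpa using pwEmit_shift x h0 h1 ht m) rest' 1
            simp [pwRun, this, pwEmit_cap x h0 h1 ht]
          · simp [pwRun, hxc]

-- ===== VERDICT (by name: the statement is the Claim_ definition above) =====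
theorem phone_words_spec : Claim_equal_phone_words := by
  intro s _ hpre0
  have hpre : ∀ c ∈ s.toList.takeWhile (fun c => c != '-'),
      c ∈ (['0','1','2','3','4','5','6','7','8','9'] : List Char) := by
    simpa only [Pre_phone_words, List.all_eq_true, decide_eq_true_eq] using hpre0
  unfold Spec_phone_words phone_words phone_words_alt
  cases hs : s.toList with
  | nil => simp only [hs]; rfl
  | cons t0 tt =>
    rw [hs] at hpre
    by_cases h0 : t0 = '-'
    · subst h0
      simp only [hs, List.cons_append, List.takeWhile_cons, bne_self_eq_false,
        Bool.false_eq_true, if_false]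
      show String.mk (pwLoop ('-' :: (tt ++ ['-'])) ['-'] []) = ""
      simp only [pwLoop]
      rfl
    · have htw : (t0 :: tt).takeWhile (fun c => c != '-') =
          t0 :: tt.takeWhile (fun c => c != '-') := by
        simp [h0]
      rw [htw] at hpre
      have hc : t0 ∈ (['0','1','2','3','4','5','6','7','8','9'] : List Char) :=
        hpre t0 (by simp)
      have hr : ∀ x ∈ tt.takeWhile (fun c => c != '-'),
          x ∈ (['0','1','2','3','4','5','6','7','8','9'] : List Char) := by
        intro x hx; exact hpre x (by simp [hx])
      -- tt = takeWhile ++ dropWhile, and dropWhile ++ ['-'] starts with '-'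
      obtain ⟨junk, hj⟩ : ∃ junk,
          tt.dropWhile (fun c => c != '-') ++ ['-'] = '-' :: junk := by
        cases hd : tt.dropWhile (fun c => c != '-') with
        | nil => exact ⟨[], rfl⟩
        | cons d ds =>
          have : ¬((fun c => c != '-') d = true) := by
            have := List.head_dropWhile_not (p := fun c => c != '-') (l := tt)
              (by simp [hd])
            simpa [hd] using this
          have hd' : d = '-' := by simpa using this
          exact ⟨ds ++ ['-'], by simp [hd']⟩
      have hsplit : tt = tt.takeWhile (fun c => c != '-') ++
          tt.dropWhile (fun c => c != '-') := (List.takeWhile_append_dropWhile).symm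
      have h := pwLoop_run junk (tt.takeWhile (fun c => c != '-')) t0 1 [] hr hc
        (pwOkK_one t0 hc)
      simp only [List.replicate_one, List.nil_append] at h
      simp only [hs, htw, List.cons_append, List.headD_cons]
      rw [show tt ++ ['-'] = tt.takeWhile (fun c => c != '-') ++ ('-' :: junk) by
        conv_lhs => rw [hsplit]
        rw [List.append_assoc, hj]]
      exact congrArg String.mk h
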